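-- pv_equiv track=rewrite | github.com/P4ZD4N/codewars | pyramid-array/main.py | pyramid
-- ===== SOURCE A (Python) =====
-- def pyramid(number_of_arrays):
--     pyramid = []
--     if number_of_arrays >= 0:
--         for number in range(number_of_arrays):
--             auxiliary_array = []
--             for index in range(number+1):
--                 auxiliary_array.insert(index, 1)
--             pyramid.append(auxiliary_array)
--         return pyramid
--     else:
--         return "error"
-- ===== SOURCE B (Python) =====
-- def pyramid(number_of_arrays):
--     if number_of_arrays < 0:
--         return "error"
--     result = []
--     row = []
--     for _ in range(number_of_arrays):
--         row = row + [1]   # fresh list each iteration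
--         result.append(row)
--     return result
-- ===== Notes on version B (the rewrite author's own statement) =====
-- stated objective: simpler
-- what changed: Drops the inner element-by-element insert loop: one outer loop maintains a single accumulator row extended by one element per iteration instead of rebuilding every row from scratch with repeated list.insert.
-- outside the precondition, e.g. on pyramid(-1): A returns 'error', B returns 'error'
import Mathlib
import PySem

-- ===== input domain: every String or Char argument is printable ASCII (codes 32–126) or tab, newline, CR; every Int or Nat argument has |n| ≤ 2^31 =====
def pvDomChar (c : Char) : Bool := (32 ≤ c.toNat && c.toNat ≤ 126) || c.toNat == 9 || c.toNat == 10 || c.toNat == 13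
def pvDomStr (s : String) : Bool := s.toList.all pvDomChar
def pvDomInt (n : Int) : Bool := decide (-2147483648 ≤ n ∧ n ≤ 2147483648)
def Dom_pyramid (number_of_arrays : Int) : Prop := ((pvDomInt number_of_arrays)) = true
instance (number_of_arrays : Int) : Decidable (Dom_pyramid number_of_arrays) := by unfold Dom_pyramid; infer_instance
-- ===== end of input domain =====

-- B replaces the inner insert loop with a single accumulator row grown by one element per
-- outer iteration (simpler decomposition; return value only).

-- ===== PORT A =====
-- Literal port of A. On number_of_arrays < 0 the Python returns the string "error",
-- which is not of the declared list type; Pre_pyramid excludes those inputs and the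
-- port returns [] there (unreachable under Pre_).
def pyramid (number_of_arrays : Int) : List (List Int) :=
  if number_of_arrays ≥ 0 then
    (PySem.List.pyRange 0 number_of_arrays 1).foldl
      (fun pyr number =>
        pyr ++ [(PySem.List.pyRange 0 (number + 1) 1).foldl
                  (fun auxiliary_array index => PySem.List.insert auxiliary_array index 1) []])
      []
  else []

-- ===== PORT B =====
def pyramid_alt (number_of_arrays : Int) : List (List Int) :=
  if number_of_arrays < 0 then []
  else
    ((PySem.List.pyRange 0 number_of_arrays 1).foldl
      (fun (st : List Int × List (List Int)) _ =>
        let row := st.1 ++ [1]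
        (row, st.2 ++ [row]))
      ([], [])).2

-- ===== PRECONDITION & SPEC =====
-- Pre_ excludes negative inputs, on which A returns the string "error" — not a value of
-- the declared List (List Int) type.
def Pre_pyramid (number_of_arrays : Int) : Prop := 0 ≤ number_of_arrays
instance (number_of_arrays : Int) : Decidable (Pre_pyramid number_of_arrays) := by unfold Pre_pyramid; infer_instance
def pvWitness_pyramid : Int := (3)
def Spec_pyramid (number_of_arrays : Int) (out : List (List Int)) : Prop := out = pyramid_alt number_of_arrays
instance (number_of_arrays : Int) (out : List (List Int)) : Decidable (Spec_pyramid number_of_arrays out) := by unfold Spec_pyramid; infer_instance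

-- ===== CLAIM (what is proved, stated in full; the proofs are below) =====
def Claim_equal_pyramid : Prop := ∀ (number_of_arrays : Int), Dom_pyramid number_of_arrays → Pre_pyramid number_of_arrays → Spec_pyramid number_of_arrays (pyramid number_of_arrays)

-- ===== LEMMAS AND PROOFS =====

-- A's inner loop over range(number+1) builds a row of number+1 ones.
theorem pyramid_inner_eq (m : Nat) :
    (PySem.List.pyRange 0 (m : Int) 1).foldl
      (fun auxiliary_array index => PySem.List.insert auxiliary_array index 1) []
      = List.replicate m (1 : Int) := by
  induction m with
  | zero => simp [PySem.List.pyRange_one_eq_nil]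
  | succ k ih =>
    have h : PySem.List.pyRange 0 ((k : Int) + 1) 1
        = PySem.List.pyRange 0 (k : Int) 1 ++ [(k : Int)] := by
      exact PySem.List.pyRange_one_succ_right (by positivity)
    have hk : ((k : Int) + 1) = ((k + 1 : Nat) : Int) := by push_cast; ring
    rw [← hk, h, List.foldl_append, ih]
    simp only [List.foldl]
    have hins : PySem.List.insert (List.replicate k (1 : Int)) (k : Int) 1
        = List.replicate k (1 : Int) ++ [1] := by
      have := PySem.List.insert_natCast (List.replicate k (1 : Int)) k 1 (by simp)
      simpa using this
    rw [hins, List.replicate_succ']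

-- Joint characterisation of A's outer fold and B's accumulator fold.
theorem pyramid_folds_eq (m : Nat) :
    (PySem.List.pyRange 0 (m : Int) 1).foldl
      (fun pyr number =>
        pyr ++ [(PySem.List.pyRange 0 (number + 1) 1).foldl
                  (fun auxiliary_array index => PySem.List.insert auxiliary_array index 1) []])
      []
      = (List.range m).map (fun k => List.replicate (k + 1) (1 : Int))
    ∧
    (PySem.List.pyRange 0 (m : Int) 1).foldl
      (fun (st : List Int × List (List Int)) _ =>
        let row := st.1 ++ [1]
        (row, st.2 ++ [row]))
      ([], [])
      = (List.replicate m (1 : Int), (List.range m).map (fun k => List.replicate (k + 1) (1 : Int))) := by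
  induction m with
  | zero => simp [PySem.List.pyRange_one_eq_nil]
  | succ k ih =>
    obtain ⟨ihA, ihB⟩ := ih
    have h : PySem.List.pyRange 0 ((k : Int) + 1) 1
        = PySem.List.pyRange 0 (k : Int) 1 ++ [(k : Int)] := by
      exact PySem.List.pyRange_one_succ_right (by positivity)
    have hk : (((k + 1 : Nat)) : Int) = ((k : Int) + 1) := by push_cast; ring
    constructor
    · rw [hk, h, List.foldl_append, ihA]
      simp only [List.foldl]
      have hinner : (PySem.List.pyRange 0 ((k : Int) + 1) 1).foldl
          (fun auxiliary_array index => PySem.List.insert auxiliary_array index 1) []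
          = List.replicate (k + 1) (1 : Int) := by
        have := pyramid_inner_eq (k + 1)
        rw [show (((k + 1 : Nat)) : Int) = ((k : Int) + 1) by push_cast; ring] at this
        exact this
      rw [hinner, List.range_succ, List.map_append]
      simp
    · rw [hk, h, List.foldl_append, ihB]
      simp only [List.foldl]
      rw [List.range_succ, List.map_append]
      simp [List.replicate_succ']

-- ===== VERDICT (by name: the statement is the Claim_ definition above) =====
theorem pyramid_spec : Claim_equal_pyramid := by
  intro n _ hpre
  unfold Spec_pyramid pyramid pyramid_alt
  have hpre' : Pre_pyramid n := hpre
  unfold Pre_pyramid at hpre'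
  rw [if_pos (by omega : n ≥ 0), if_neg (by omega : ¬ n < 0)]
  have hn : n = ((n.toNat : Nat) : Int) := by omega
  rw [hn]
  obtain ⟨hA, hB⟩ := pyramid_folds_eq n.toNat
  rw [hA, hB]
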